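-- pv_equiv track=rewrite | github.com/saenuruki/Codility | StacksAndQueues/stoneWall.py | solution
-- ===== SOURCE A (Python) =====
-- def solution(H):
--     # if H is geven [8,8,5,7,9,8,7,4,8]
--     # stack = [] <-8
--     # stack = [8] <-8  # 8,8で揃った時はcountしない
--     # stack = [8] <-5
--     # stack = [5] <-7
--     # stack = [5,7] <-9
--     # stack = [5,7,9] <-8
--     # stack = [5,7] <-7 #7,7で揃った時なcountしない
--     # stack = [5,7] <-4
--     # stack = [4] <-8
--
--     count = 0
--     stack = []
--
--     if len(H) < 1 or len(H) > 100000: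
--         return 0
--
--     for element_H in H:
--         if element_H < 1 or element_H > 1000000000:
--             return 0
--         if len(stack) == 0:
--             stack.append(element_H)
--             count = count + 1
--         else:
--             if stack[-1] < element_H:
--                 stack.append(element_H)
--                 count = count + 1
--             elif stack[-1] > element_H:
--                 stack = [x for x in stack if x <= element_H]
--                 count = count + 1
--             # stack[-1] == element_Hの時は何もしない
--
--     return count
-- ===== SOURCE B (Python) =====
-- def solution(H):
--     # Validate once up front (A's in-loop early return also yields 0 on any
--     # invalid element), then count duplicates and return len(H) - dup.
--     if not 1 <= len(H) <= 100000 or any(not 1 <= h <= 1000000000 for h in H):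
--         return 0
--     stack = []
--     dup = 0
--     for h in H:
--         if stack and stack[-1] == h:
--             dup += 1
--         elif stack and stack[-1] > h:
--             while stack and stack[-1] > h:
--                 stack.pop()
--         else:
--             stack.append(h)
--     return len(H) - dup
-- ===== Notes on version B (the rewrite author's own statement) =====
-- stated objective: alternative
-- what changed: B validates the whole list in one up-front pass instead of A's in-loop early returns, counts only the equal-top events with a while-pop stack (no per-element list-comprehension rebuild, nothing pushed on a drop), and returns len(H) minus that count instead of accumulating the count directly.
import Mathlib
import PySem

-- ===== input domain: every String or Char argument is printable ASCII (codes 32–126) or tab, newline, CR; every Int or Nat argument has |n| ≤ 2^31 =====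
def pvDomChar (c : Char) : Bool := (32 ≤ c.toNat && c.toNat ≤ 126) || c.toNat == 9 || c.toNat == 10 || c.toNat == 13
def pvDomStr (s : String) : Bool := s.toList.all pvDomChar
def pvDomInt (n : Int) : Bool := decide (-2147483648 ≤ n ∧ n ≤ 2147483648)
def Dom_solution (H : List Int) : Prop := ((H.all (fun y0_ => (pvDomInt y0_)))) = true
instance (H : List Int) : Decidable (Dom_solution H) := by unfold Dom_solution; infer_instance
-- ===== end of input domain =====

-- B validates the whole list up front, counts only the equal-top events (dup) with a
-- while-pop stack, and returns len(H) - dup (objective: alternative decomposition).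

-- ===== PORT A =====
-- stack kept top-at-head: Python's stack[-1] is the Lean head, append is cons,
-- and the comprehension [x for x in stack if x <= h] is List.filter (order-preserving).
def solutionLoopA : List Int → List Int → Int → Int
  | [], _, count => count
  | h :: rest, stack, count =>
    if h < 1 ∨ 1000000000 < h then 0
    else match stack with
      | [] => solutionLoopA rest [h] (count + 1)
      | t :: _ =>
        if t < h then solutionLoopA rest (h :: stack) (count + 1)
        else if h < t then solutionLoopA rest (stack.filter (fun x => x ≤ h)) (count + 1)
        else solutionLoopA rest stack count

def solution (H : List Int) : Int :=
  if H.length < 1 ∨ 100000 < H.length then 0 else solutionLoopA H [] 0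

-- ===== PORT B =====
-- 'while stack and stack[-1] > h: stack.pop()' (top at head)
def popGT (h : Int) : List Int → List Int
  | [] => []
  | t :: rest => if h < t then popGT h rest else t :: rest

-- the for-loop of B: accumulates only dup, the number of equal-top events
def dupLoopB : List Int → List Int → Int → Int
  | [], _, dup => dup
  | h :: rest, stack, dup =>
    if stack.head? = some h then dupLoopB rest stack (dup + 1)
    else if (stack.head?.map (fun t => decide (h < t))).getD false = true then
      dupLoopB rest (popGT h stack) dup
    else dupLoopB rest (h :: stack) dup

def solution_alt (H : List Int) : Int :=
  if H.length < 1 ∨ 100000 < H.length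
     ∨ H.any (fun h => decide (h < 1) || decide (1000000000 < h)) = true
  then 0
  else H.length - dupLoopB H [] 0

-- ===== PRECONDITION & SPEC =====
def Spec_solution (H : List Int) (out : Int) : Prop := out = solution_alt H
instance (H : List Int) (out : Int) : Decidable (Spec_solution H out) := by unfold Spec_solution; infer_instance

-- ===== CLAIM (what is proved, stated in full; the proofs are below) =====
def Claim_equal_solution : Prop := ∀ (H : List Int), Dom_solution H → Spec_solution H (solution H)

-- ===== LEMMAS AND PROOFS =====

-- if some element of L is out of range, A's loop returns 0 whatever the state
theorem loopA_invalid (L : List Int) : ∀ (s : List Int) (c : Int),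
    (∃ h ∈ L, h < 1 ∨ 1000000000 < h) → solutionLoopA L s c = 0 := by
  induction L with
  | nil => intro s c h; simp at h
  | cons h rest ih =>
    intro s c hex
    by_cases hb : h < 1 ∨ 1000000000 < h
    · simp [solutionLoopA, hb]
    · have hex' : ∃ x ∈ rest, x < 1 ∨ 1000000000 < x := by
        rcases hex with ⟨x, hx, hxb⟩
        rcases List.mem_cons.mp hx with rfl | hx'
        · exact absurd hxb hb
        · exact ⟨x, hx', hxb⟩
      match s with
      | [] => simp only [solutionLoopA, if_neg hb]; exact ih _ _ hex'
      | t :: srest =>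
        simp only [solutionLoopA, if_neg hb]
        split_ifs <;> exact ih _ _ hex'

-- on a strictly decreasing stack, popping while the top exceeds h is filtering by ≤ h
theorem popGT_eq_filter (h : Int) (s : List Int)
    (hs : s.Pairwise (fun a b => b < a)) :
    popGT h s = s.filter (fun x => x ≤ h) := by
  induction s with
  | nil => rfl
  | cons t rest ih =>
    rcases List.pairwise_cons.mp hs with ⟨hall, hrest⟩
    by_cases hth : h < t
    · have : ¬ (t ≤ h) := by omega
      simp [popGT, hth, this, ih hrest]
    · have hth' : t ≤ h := by omega
      have : rest.filter (fun x => x ≤ h) = rest := by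
        apply List.filter_eq_self.mpr
        intro x hx
        have := hall x hx
        simp; omega
      simp [popGT, hth, hth', this]

-- the bookkeeping link: on valid input A's count plus B's dup equals c + d + |L|
theorem loops_sum (L : List Int) : ∀ (s : List Int) (c d : Int),
    (∀ h ∈ L, 1 ≤ h ∧ h ≤ 1000000000) →
    s.Pairwise (fun a b => b < a) →
    solutionLoopA L s c + dupLoopB L s d = c + d + L.length := by
  induction L with
  | nil => intro s c d _ _; simp [solutionLoopA, dupLoopB]
  | cons h rest ih =>
    intro s c d hval hs
    have hb : ¬ (h < 1 ∨ 1000000000 < h) := by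
      have := hval h (by simp); omega
    have hval' : ∀ x ∈ rest, 1 ≤ x ∧ x ≤ 1000000000 := fun x hx => hval x (by simp [hx])
    match s with
    | [] =>
      simp only [solutionLoopA, dupLoopB, if_neg hb, List.head?_nil,
        Option.map_none, Option.getD_none, reduceCtorEq, if_false]
      have := ih [h] (c + 1) d hval' (by simp)
      simp only [List.length_cons]; push_cast; push_cast at this; omega
    | t :: srest =>
      rcases List.pairwise_cons.mp hs with ⟨hall, hrest⟩
      simp only [solutionLoopA, dupLoopB, if_neg hb, List.head?_cons,
        Option.map_some, Option.getD_some, Option.some.injEq, decide_eq_true_eq]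
      by_cases h1 : t < h
      · have hne : ¬ (t = h) := by omega
        have h2 : ¬ (h < t) := by omega
        rw [if_pos h1, if_neg hne, if_neg h2]
        have hpair : (h :: t :: srest).Pairwise (fun a b => b < a) := by
          refine List.pairwise_cons.mpr ⟨?_, hs⟩
          intro x hx
          rcases List.mem_cons.mp hx with rfl | hx'
          · exact h1
          · have := hall x hx'; omega
        have := ih (h :: t :: srest) (c + 1) d hval' hpair
        simp only [List.length_cons]; push_cast; push_cast at this; omega
      · by_cases h2 : h < t
        · have hne : ¬ (t = h) := by omega
          rw [if_neg h1, if_pos h2, if_neg hne, if_pos h2]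
          rw [popGT_eq_filter h _ hs]
          have := ih ((t :: srest).filter (fun x => x ≤ h)) (c + 1) d hval'
            (List.Pairwise.filter _ hs)
          simp only [List.length_cons]; push_cast; push_cast at this; omega
        · have heq : t = h := by omega
          rw [if_neg h1, if_neg h2, if_pos heq]
          have := ih (t :: srest) c (d + 1) hval' hs
          simp only [List.length_cons]; push_cast; push_cast at this; omega

-- ===== VERDICT (by name: the statement is the Claim_ definition above) =====
theorem solution_spec : Claim_equal_solution := by
  intro H _
  unfold Spec_solution solution solution_alt
  by_cases hl : H.length < 1 ∨ 100000 < H.length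
  · rw [if_pos hl]
    rcases hl with h | h
    · rw [if_pos (Or.inl h)]
    · rw [if_pos (Or.inr (Or.inl h))]
  · by_cases hv : ∃ h ∈ H, h < 1 ∨ 1000000000 < h
    · have hany : H.any (fun h => decide (h < 1) || decide (1000000000 < h)) = true := by
        simp only [List.any_eq_true, Bool.or_eq_true, decide_eq_true_eq]
        exact hv
      rw [if_neg hl, if_pos (Or.inr (Or.inr hany)), loopA_invalid H [] 0 hv]
    · have hany : ¬ (H.any (fun h => decide (h < 1) ∨ decide (1000000000 < h)) = true) := by
        simp only [List.any_eq_true, decide_eq_true_eq]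
        exact hv
      have hval : ∀ h ∈ H, 1 ≤ h ∧ h ≤ 1000000000 := by
        intro x hx
        by_contra hc
        exact hv ⟨x, hx, by omega⟩
      rw [if_neg hl, if_neg (by
        rcases not_or.mp hl with ⟨h1, h2⟩
        simp only [not_or]
        exact ⟨h1, h2, by simpa using hany⟩)]
      have := loops_sum H [] 0 0 hval (by simp)
      omega
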